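-- pv_equiv track=rewrite | github.com/jinxuan-owyong/leetcode | py/2381_ShiftingLettersII.py | shiftingLetters
-- ===== SOURCE A (Python) =====
-- from typing import List
--
-- def shiftingLetters(s: str, shifts: List[List[int]]) -> str:
--     BACKWARD, FORWARD = 0, 1
--     """
--     use a single array to keep track of the start and end of the shifts in a character
--     [start, end, direction] = [2, 4, 0]
--     [0, 0, 0, 0, 0, 0] -> [0, 0, -1, 0, 1, 0]
--     "1" denotes a forward shift, while "-1" denotes backward
--     then we can keep track of the number of shifts with a counter during the final pass,
--     adding or subtracting based on count[i]
--     """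
--     change = [0] * (len(s)+1)
--     for start, end, direction in shifts:
--         change[start] += -1 if direction == BACKWARD else 1
--         change[end+1] += 1 if direction == BACKWARD else -1
--
--     result = []
--     offset = 0
--     for i in range(len(s)):
--         offset += change[i]
--         result.append(chr((ord(s[i]) - ord('a') + offset) % 26 + ord('a')))
--
--     return ''.join(result)
-- ===== SOURCE B (Python) =====
-- def shiftingLetters(s, shifts):
--     n = len(s)
--     offsets = [0] * n
--     for start, end, direction in shifts:
--         d = 1 if direction else -1
--         for i in range(start, end + 1):
--             offsets[i] += d
--     return ''.join(chr((ord(c) - ord('a') + offsets[i]) % 26 + ord('a'))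
--                    for i, c in enumerate(s))
-- ===== Notes on version B (the rewrite author's own statement) =====
-- stated objective: simpler
-- what changed: Replaces the difference-table + running-prefix-sum trick with a direct per-position offsets array updated by scanning each shift range, then a single character-building pass. Pre_ excludes shift triples that are malformed or whose end+1 exceeds len(s) (A raises ValueError/IndexError there) and those with a negative start or start > end+1, where A's negative-index wraparound / inverted difference-table entries are accidental.
-- outside the precondition, e.g. on shiftingLetters('abc', [[2, 0, 1]]): A returns 'aac', B returns 'abc'; on shiftingLetters('ab', [[-1, 1, 1]]): A returns 'ab', B returns 'bd'
import Mathlib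
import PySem

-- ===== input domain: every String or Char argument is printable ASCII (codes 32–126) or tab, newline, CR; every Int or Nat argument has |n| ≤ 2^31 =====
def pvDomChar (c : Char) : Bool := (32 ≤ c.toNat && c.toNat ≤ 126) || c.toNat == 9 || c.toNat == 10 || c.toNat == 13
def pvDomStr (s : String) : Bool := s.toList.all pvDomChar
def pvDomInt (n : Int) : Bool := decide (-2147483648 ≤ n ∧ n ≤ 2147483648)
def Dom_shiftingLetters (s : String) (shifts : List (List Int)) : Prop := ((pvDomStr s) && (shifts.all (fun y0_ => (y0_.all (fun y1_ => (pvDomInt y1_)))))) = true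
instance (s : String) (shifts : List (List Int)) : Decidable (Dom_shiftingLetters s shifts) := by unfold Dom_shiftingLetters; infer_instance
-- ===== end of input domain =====

-- B replaces A's difference-table + running prefix sum with direct per-range updates of an
-- offsets array; equivalence is proved on well-formed shift ranges (Pre_).


-- ===== PORT A =====
-- one step of A's first loop: change[start] += ±1; change[end+1] -= ±1 (python indexing)
def chStep (ch : List Int) (sh : List Int) : List Int :=
  match sh with
  | [start, e, dir] =>
      let ch := PySem.List.pySetD ch start
        (PySem.List.pyGetD ch start 0 + (if dir == 0 then -1 else 1))
      PySem.List.pySetD ch (e + 1)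
        (PySem.List.pyGetD ch (e + 1) 0 + (if dir == 0 then 1 else -1))
  | _ => ch  -- python raises on malformed triples; excluded by Pre_

def shiftingLetters (s : String) (shifts : List (List Int)) : String :=
  let cs := s.toList
  let change := shifts.foldl chStep (List.replicate (cs.length + 1) (0 : Int))
  let res := (PySem.List.pyRange 0 (cs.length : Int) 1).foldl
    (fun (acc : List Char × Int) i =>
      let offset := acc.2 + PySem.List.pyGetD change i 0
      (acc.1 ++ [Char.ofNat ((PySem.Int.mod (((PySem.List.pyGetD cs i 'a').toNat : Int) - 97 + offset) 26).toNat + 97)], offset))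
    ([], 0)
  String.mk res.1

-- ===== PORT B =====
-- one step of B's outer loop: add d to offsets[i] for i in range(start, end+1)
def offStep (off : List Int) (sh : List Int) : List Int :=
  match sh with
  | [start, e, dir] =>
      let d : Int := if dir == 0 then -1 else 1
      (PySem.List.pyRange start (e + 1) 1).foldl
        (fun o i => PySem.List.pySetD o i (PySem.List.pyGetD o i 0 + d)) off
  | _ => off  -- python raises on malformed triples; excluded by Pre_

def shiftingLetters_alt (s : String) (shifts : List (List Int)) : String :=
  let cs := s.toList
  let offsets := shifts.foldl offStep (List.replicate cs.length (0 : Int))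
  String.mk ((PySem.List.enumerate cs 0).map (fun p =>
    Char.ofNat ((PySem.Int.mod (((p.2.toNat : Int)) - 97 + PySem.List.pyGetD offsets p.1 0) 26).toNat + 97)))

-- ===== PRECONDITION & SPEC =====
-- Pre_ excludes shift triples that are malformed or whose end+1 exceeds len(s) (A raises
-- ValueError/IndexError there) and those with a negative start or start > end+1, where A's
-- negative-index wraparound / inverted difference-table entries are accidental.
def Pre_shiftingLetters (s : String) (shifts : List (List Int)) : Prop :=
  ∀ sh ∈ shifts, sh.length = 3 ∧ 0 ≤ sh.getD 0 0 ∧ sh.getD 0 0 ≤ sh.getD 1 0 + 1 ∧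
    sh.getD 1 0 + 1 ≤ (s.toList.length : Int)
instance (s : String) (shifts : List (List Int)) : Decidable (Pre_shiftingLetters s shifts) := by
  unfold Pre_shiftingLetters; infer_instance

def pvWitness_shiftingLetters : String × List (List Int) := ("abc", [[0, 1, 1], [1, 2, 0]])

def Spec_shiftingLetters (s : String) (shifts : List (List Int)) (out : String) : Prop := out = shiftingLetters_alt s shifts
instance (s : String) (shifts : List (List Int)) (out : String) : Decidable (Spec_shiftingLetters s shifts out) := by unfold Spec_shiftingLetters; infer_instance

-- ===== CLAIM (what is proved, stated in full; the proofs are below) =====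
def Claim_equal_shiftingLetters : Prop := ∀ (s : String) (shifts : List (List Int)), Dom_shiftingLetters s shifts → Pre_shiftingLetters s shifts → Spec_shiftingLetters s shifts (shiftingLetters s shifts)

-- ===== LEMMAS AND PROOFS =====

-- exclusive prefix sum of A's difference table
def pref0 (c : List Int) : Nat → Int
  | 0 => 0
  | i + 1 => pref0 c i + c.getD i 0

theorem getD_set_eq_ite (c : List Int) (p m : Nat) (v : Int) :
    (c.set p v).getD m 0 = if m = p ∧ p < c.length then v else c.getD m 0 := by
  simp only [List.getD, List.getElem?_set]
  by_cases hm : m < c.length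
  · by_cases he : m = p
    · subst he; simp [hm]
    · simp [he, Ne.symm he]
  · have h1 : ¬ (m = p ∧ p < c.length) := by
      rintro ⟨rfl, h⟩; exact hm h
    simp only [h1, if_false]
    by_cases he : p = m
    · subst he; simp [show ¬ p < c.length from fun h => hm h]
    · simp [he]

theorem pref0_set (c : List Int) (p : Nat) (v : Int) (hp : p < c.length) :
    ∀ m, pref0 (c.set p v) m = pref0 c m + if p < m then v - c.getD p 0 else 0 := by
  intro m
  induction m with
  | zero => simp [pref0]
  | succ k ih =>
      simp only [pref0, ih, getD_set_eq_ite]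
      by_cases hk : k = p
      · subst hk
        simp [hp]
      · simp [hk]
        by_cases hpk : p < k
        · simp [hpk, hpk.le]; ring
        · simp [hpk]
          intro h
          exfalso; omega

-- B's inner range loop: length preserved and pointwise effect
theorem rangeAdd_spec (d : Int) :
    ∀ (n : Nat) (a b : Int), (b - a).toNat ≤ n → 0 ≤ a → ∀ (o : List Int),
      (((PySem.List.pyRange a b 1).foldl
          (fun o i => PySem.List.pySetD o i (PySem.List.pyGetD o i 0 + d)) o).length = o.length ∧
       ∀ k : Nat, k < o.length →
        ((PySem.List.pyRange a b 1).foldl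
          (fun o i => PySem.List.pySetD o i (PySem.List.pyGetD o i 0 + d)) o).getD k 0 =
          o.getD k 0 + if a ≤ (k : Int) ∧ (k : Int) < b then d else 0) := by
  intro n
  induction n with
  | zero =>
      intro a b hn ha o
      have hba : b ≤ a := by omega
      rw [PySem.List.pyRange_one_eq_nil hba]
      constructor
      · rfl
      · intro k hk
        simp only [List.foldl_nil]
        have : ¬ (a ≤ (k:Int) ∧ (k:Int) < b) := by omega
        simp [this]
  | succ m ih =>
      intro a b hn ha o
      by_cases hab : a < b
      · rw [PySem.List.pyRange_one_cons hab]
        simp only [List.foldl_cons]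
        set o1 := PySem.List.pySetD o a (PySem.List.pyGetD o a 0 + d) with ho1
        have hset : o1 = o.set a.toNat (PySem.List.pyGetD o a 0 + d) :=
          PySem.List.pySetD_of_nonneg o _ ha
        have hlen1 : o1.length = o.length := by rw [hset]; simp
        obtain ⟨ihlen, ihget⟩ := ih (a+1) b (by omega) (by omega) o1
        refine ⟨by rw [ihlen, hlen1], ?_⟩
        intro k hk
        rw [ihget k (by omega)]
        rw [hset, getD_set_eq_ite]
        by_cases hka : (k : Int) = a
        · have hka' : k = a.toNat := by omega
          by_cases hin : a.toNat < o.length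
          · have hget : PySem.List.pyGetD o a 0 = o[a.toNat] :=
              PySem.List.pyGetD_eq_getElem o 0 ha (by omega)
            have hgd : o.getD a.toNat 0 = o[a.toNat] := List.getD_eq_getElem o 0 hin
            simp [hka', hin, hget]
            have c1 : ¬ (a + 1 ≤ (k:Int)) := by omega
            have c2 : a ≤ (k:Int) ∧ (k:Int) < b := by omega
            simp [hka'] at *
            omega
          · exfalso; omega
        · have h1 : ¬ (k = a.toNat ∧ a.toNat < o.length) := by
            rintro ⟨rfl, _⟩; omega
          simp only [h1, if_false]
          have h2 : (a + 1 ≤ (k:Int) ∧ (k:Int) < b) ↔ (a ≤ (k:Int) ∧ (k:Int) < b) := by omega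
          simp only [h2]
      · rw [PySem.List.pyRange_one_eq_nil (by omega)]
        constructor
        · rfl
        · intro k hk
          have : ¬ (a ≤ (k:Int) ∧ (k:Int) < b) := by omega
          simp [this]

theorem pref0_pySetD (c : List Int) (idx : Int) (v : Int)
    (h0 : 0 ≤ idx) (h1 : idx < (c.length : Int)) :
    ∀ m, pref0 (PySem.List.pySetD c idx (PySem.List.pyGetD c idx 0 + v)) m
      = pref0 c m + if idx < (m : Int) then v else 0 := by
  intro m
  rw [PySem.List.pySetD_of_nonneg c _ h0]
  have hlt : idx.toNat < c.length := by omega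
  rw [pref0_set c idx.toNat _ hlt m]
  have hget : PySem.List.pyGetD c idx 0 = c.getD idx.toNat 0 := by
    rw [PySem.List.pyGetD_eq_getElem c 0 h0 h1, List.getD_eq_getElem c 0 hlt]
  rw [hget]
  have : idx.toNat < m ↔ idx < (m : Int) := by omega
  simp only [this]
  split_ifs <;> ring

theorem step_inv (n : Nat) (start e dir : Int)
    (h0 : 0 ≤ start) (h1 : start ≤ e + 1) (h2 : e + 1 ≤ (n : Int))
    (c o : List Int) (hc : c.length = n + 1) (ho : o.length = n)
    (hinv : ∀ i : Nat, i < n → pref0 c (i + 1) = o.getD i 0) :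
    (chStep c [start, e, dir]).length = n + 1 ∧
    (offStep o [start, e, dir]).length = n ∧
    ∀ i : Nat, i < n → pref0 (chStep c [start, e, dir]) (i + 1) = (offStep o [start, e, dir]).getD i 0 := by
  have hv2 : (if dir == 0 then (1:Int) else -1) = -(if dir == 0 then (-1:Int) else 1) := by
    by_cases h : dir == 0 <;> simp [h]
  set v : Int := if dir == 0 then (-1:Int) else 1 with hv
  obtain ⟨olen, oget⟩ := rangeAdd_spec v ((e + 1 - start).toNat) start (e + 1) le_rfl h0 o
  have hcs : chStep c [start, e, dir]
      = PySem.List.pySetD (PySem.List.pySetD c start (PySem.List.pyGetD c start 0 + v)) (e + 1)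
          (PySem.List.pyGetD (PySem.List.pySetD c start (PySem.List.pyGetD c start 0 + v)) (e + 1) 0 + (-v)) := by
    simp only [chStep, hv2, hv]
  have hos : offStep o [start, e, dir]
      = (PySem.List.pyRange start (e + 1) 1).foldl
          (fun o i => PySem.List.pySetD o i (PySem.List.pyGetD o i 0 + v)) o := by
    simp only [offStep, hv]
  set c1 := PySem.List.pySetD c start (PySem.List.pyGetD c start 0 + v) with hc1
  have hlen1 : c1.length = c.length := by
    rw [hc1, PySem.List.pySetD_of_nonneg c _ h0]; simp
  have hlen2 : (chStep c [start, e, dir]).length = c.length := by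
    rw [hcs, PySem.List.pySetD_of_nonneg c1 _ (by omega : (0:Int) ≤ e + 1)]
    simpa using hlen1
  refine ⟨by omega, by rw [hos]; omega, ?_⟩
  intro i hi
  have p1 : ∀ m, pref0 c1 m = pref0 c m + if start < (m : Int) then v else 0 :=
    pref0_pySetD c start v h0 (by omega)
  have p2 : ∀ m, pref0 (chStep c [start, e, dir]) m
      = pref0 c1 m + if e + 1 < (m : Int) then -v else 0 := by
    rw [hcs]
    exact pref0_pySetD c1 (e + 1) (-v) (by omega) (by omega)
  rw [p2, p1, hinv i hi, hos, oget i (by omega)]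
  have hsplit : (if start < ((i : Int) + 1) then v else 0) + (if e + 1 < ((i : Int) + 1) then -v else 0)
      = if start ≤ (i : Int) ∧ (i : Int) < e + 1 then v else 0 := by
    by_cases hA : start ≤ (i : Int) <;> by_cases hB : e + 1 ≤ (i : Int)
    · rw [if_pos (by omega), if_pos (by omega), if_neg (by omega)]; ring
    · rw [if_pos (by omega), if_neg (by omega), if_pos (by omega)]; ring
    · exfalso; omega
    · rw [if_neg (by omega), if_neg (by omega), if_neg (by omega)]; ring
  push_cast
  push_cast at hsplit
  linarith [hsplit]

theorem getD_replicate_zero (j i : Nat) : (List.replicate j (0:Int)).getD i 0 = 0 := by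
  simp [List.getD, List.getElem?_replicate]
  split_ifs <;> rfl

theorem pref0_replicate (j : Nat) : ∀ m, pref0 (List.replicate j (0:Int)) m = 0 := by
  intro m; induction m with
  | zero => rfl
  | succ k ih => simp [pref0, ih]

theorem fold_inv (n : Nat) :
    ∀ (shifts : List (List Int)),
      (∀ sh ∈ shifts, sh.length = 3 ∧ 0 ≤ sh.getD 0 0 ∧ sh.getD 0 0 ≤ sh.getD 1 0 + 1 ∧
        sh.getD 1 0 + 1 ≤ (n : Int)) →
      ∀ c o : List Int, c.length = n + 1 → o.length = n →
        (∀ i : Nat, i < n → pref0 c (i + 1) = o.getD i 0) →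
        (shifts.foldl chStep c).length = n + 1 ∧ (shifts.foldl offStep o).length = n ∧
        ∀ i : Nat, i < n → pref0 (shifts.foldl chStep c) (i + 1) = (shifts.foldl offStep o).getD i 0 := by
  intro shifts
  induction shifts with
  | nil => intro _ c o hc ho hinv; exact ⟨hc, ho, hinv⟩
  | cons sh rest ih =>
      intro hpre c o hc ho hinv
      obtain ⟨hlen3, hg0, hg1, hg2⟩ := hpre sh (List.mem_cons_self)
      rcases sh with _ | ⟨a, _ | ⟨b, _ | ⟨d, _ | t⟩⟩⟩ <;> simp at hlen3
      simp only [List.getD_cons_zero, List.getD_cons_succ] at hg0 hg1 hg2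
      obtain ⟨l1, l2, l3⟩ := step_inv n a b d hg0 hg1 hg2 c o hc ho hinv
      simp only [List.foldl_cons]
      exact ih (fun x hx => hpre x (List.mem_cons_of_mem _ hx)) _ _ l1 l2 l3

theorem loopA (c : List Int) (f : Int → Int → Char) (m : Nat) :
    (PySem.List.pyRange 0 (m : Int) 1).foldl
      (fun (acc : List Char × Int) i =>
        (acc.1 ++ [f i (acc.2 + PySem.List.pyGetD c i 0)], acc.2 + PySem.List.pyGetD c i 0)) ([], 0)
    = ((List.range m).map (fun k : Nat => f (k : Int) (pref0 c (k + 1))), pref0 c m) := by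
  induction m with
  | zero =>
      rw [show ((0:Nat):Int) = 0 by rfl, PySem.List.pyRange_one_eq_nil le_rfl]
      simp [pref0]
  | succ k ih =>
      have hcast : ((k + 1 : Nat) : Int) = (k : Int) + 1 := by push_cast; ring
      rw [hcast, PySem.List.pyRange_one_succ_right (by positivity), List.foldl_append, ih]
      simp [List.range_succ, pref0]

theorem enumMap (f : Int × Char → Char) :
    ∀ (cs : List Char) (s : Int),
      (PySem.List.enumerate cs s).map f
        = (List.range cs.length).map (fun k : Nat => f ((s + (k : Int)), cs.getD k 'a')) := by
  intro cs
  induction cs with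
  | nil => intro s; simp [PySem.List.enumerate]
  | cons x xs ih =>
      intro s
      rw [PySem.List.enumerate_cons, List.map_cons, ih (s + 1)]
      simp only [List.length_cons, List.range_succ_eq_map, List.map_cons, List.map_map]
      congr 1
      · simp
      · apply List.map_congr_left
        intro k _
        simp only [Function.comp_apply, List.getD_cons_succ]
        congr 1
        push_cast
        ring_nf

-- ===== VERDICT (by name: the statement is the Claim_ definition above) =====
theorem shiftingLetters_spec : Claim_equal_shiftingLetters := by
  intro s shifts _dom hpre
  unfold Spec_shiftingLetters
  obtain ⟨hlc, hlo, hinv⟩ := fold_inv s.toList.length shifts hpre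
    (List.replicate (s.toList.length + 1) (0:Int)) (List.replicate s.toList.length (0:Int))
    (by simp) (by simp)
    (fun i _ => by rw [pref0_replicate, getD_replicate_zero])
  have hA : shiftingLetters s shifts
      = String.mk ((List.range s.toList.length).map (fun k : Nat =>
          (fun (i off : Int) => Char.ofNat ((PySem.Int.mod (((PySem.List.pyGetD s.toList i 'a').toNat : Int) - 97 + off) 26).toNat + 97)) (k : Int)
            (pref0 (shifts.foldl chStep (List.replicate (s.toList.length + 1) (0:Int))) (k + 1)))) := by
    show String.mk ((PySem.List.pyRange 0 (s.toList.length : Int) 1).foldl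
      (fun (acc : List Char × Int) i =>
        (acc.1 ++ [(fun (i off : Int) => Char.ofNat ((PySem.Int.mod (((PySem.List.pyGetD s.toList i 'a').toNat : Int) - 97 + off) 26).toNat + 97)) i
            (acc.2 + PySem.List.pyGetD (shifts.foldl chStep (List.replicate (s.toList.length + 1) (0:Int))) i 0)],
          acc.2 + PySem.List.pyGetD (shifts.foldl chStep (List.replicate (s.toList.length + 1) (0:Int))) i 0)) ([], 0)).1
      = _
    rw [loopA (shifts.foldl chStep (List.replicate (s.toList.length + 1) (0:Int)))
      (fun (i off : Int) => Char.ofNat ((PySem.Int.mod (((PySem.List.pyGetD s.toList i 'a').toNat : Int) - 97 + off) 26).toNat + 97))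
      s.toList.length]
  have hB : shiftingLetters_alt s shifts
      = String.mk ((PySem.List.enumerate s.toList 0).map (fun p : Int × Char =>
          Char.ofNat ((PySem.Int.mod (((p.2.toNat : Int)) - 97
            + PySem.List.pyGetD (shifts.foldl offStep (List.replicate s.toList.length (0:Int))) p.1 0) 26).toNat + 97))) := rfl
  rw [hA, hB, enumMap]
  congr 1
  apply List.map_congr_left
  intro k hk
  have hkn : k < s.toList.length := List.mem_range.mp hk
  have h1 : PySem.List.pyGetD s.toList (k : Int) 'a' = s.toList.getD k 'a' := by
    rw [PySem.List.pyGetD_natCast]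
  have h2 : PySem.List.pyGetD (shifts.foldl offStep (List.replicate s.toList.length (0:Int))) ((0 : Int) + (k : Int)) 0
      = (shifts.foldl offStep (List.replicate s.toList.length (0:Int))).getD k 0 := by
    rw [show ((0 : Int) + (k : Int)) = (k : Int) by ring, PySem.List.pyGetD_natCast]
  simp only [h1, h2, hinv k hkn]
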